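-- pv_equiv track=rewrite | github.com/Arsen1302/Code-copy-detector | TestData/solutions/problem_726_5.py | solution_726_5
-- ===== SOURCE A (Python) =====
-- from typing import List
--
-- def solution_726_5(words: List[str]) -> int:
-- 	words.sort(key=len)
-- 	dp = {}
-- 	for word in words:
-- 		for i in range(len(word)):
-- 			if word not in dp:
-- 				dp[word]=dp.get(word[:i]+word[i+1:],0)+1
-- 			else:
-- 				dp[word]=max(dp.get(word[:i]+word[i+1:],0)+1,dp[word])
-- 	return max(dp.values())
-- ===== SOURCE B (Python) =====
-- from typing import List
--
-- def solution_726_5(words: List[str]) -> int: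
--     # Memoized top-down recursion over predecessor words (note: unlike A, this
--     # does not mutate/sort the input list; return value is identical).
--     S = {w for w in words if w}
--     memo = {}
--     def chain(word):
--         if word in memo:
--             return memo[word]
--         best = 1
--         for i in range(len(word)):
--             pred = word[:i] + word[i+1:]
--             if pred in S:
--                 best = max(best, 1 + chain(pred))
--         memo[word] = best
--         return best
--     return max(chain(w) for w in words if w)
-- ===== Notes on version B (the rewrite author's own statement) =====
-- stated objective: faster
-- what changed: Replaces A's bottom-up dict DP over the length-sorted list (in-place sort, then every word's deletion predecessors looked up in dp in length order) with memoized top-down recursion chain(word) over a set of the non-empty words, taking the max of chain over the words; no sorting and no mutation of the input list.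
import Mathlib
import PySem

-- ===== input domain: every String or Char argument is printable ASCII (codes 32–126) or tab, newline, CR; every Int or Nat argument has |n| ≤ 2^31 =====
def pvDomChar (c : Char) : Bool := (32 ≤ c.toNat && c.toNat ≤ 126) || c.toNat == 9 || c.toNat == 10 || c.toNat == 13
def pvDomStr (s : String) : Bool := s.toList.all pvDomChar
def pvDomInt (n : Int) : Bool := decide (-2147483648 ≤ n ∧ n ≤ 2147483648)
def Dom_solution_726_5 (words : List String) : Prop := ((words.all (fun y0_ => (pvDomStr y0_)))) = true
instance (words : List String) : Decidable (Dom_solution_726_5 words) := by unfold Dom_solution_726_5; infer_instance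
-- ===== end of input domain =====

-- B replaces A's bottom-up dict DP over the length-sorted list by memoized top-down
-- recursion over the set of non-empty words (alternative decomposition; B does not
-- mutate/sort the input list as A does — the equivalence proved is about the return value).


-- word[:i] + word[i+1:] (used verbatim by both Pythons)
def pvDel (w : String) (i : Int) : String :=
  String.ofList (PySem.List.slice w.toList none (some i) ++ PySem.List.slice w.toList (some (i + 1)) none)

-- ===== PORT A =====
def solution_726_5 (words : List String) : Int :=
  let ws := PySem.List.sorted words (fun w => PySem.Str.len w) false
  let dp : PySem.Dict String Int :=
    ws.foldl (fun dp word =>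
      (List.range word.toList.length).foldl (fun dp (i : Nat) =>
        let pred := pvDel word (i : Int)
        if dp.contains word = false then
          dp.insert word (dp.getD pred 0 + 1)
        else
          dp.insert word (max (dp.getD pred 0 + 1) (dp.getD word 0))) dp)
      PySem.Dict.empty
  match PySem.List.max? dp.values (fun x => x) with
  | some v => v
  | none => 0   -- Python raises ValueError here (no non-empty word); excluded by Pre_

-- ===== PORT B =====
-- chain(word) with the memo dict threaded through; fuel = word length bounds the
-- recursion depth (each predecessor is one character shorter), it is never exhausted.
def pvChain (S : PySem.Set String) : Nat → String → PySem.Dict String Int → Int × PySem.Dict String Int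
  | fuel, word, memo =>
    match memo.get? word with
    | some v => (v, memo)
    | none =>
      match fuel with
      | 0 => (1, memo.insert word 1)
      | fuel' + 1 =>
        let r := (List.range word.toList.length).foldl
          (fun (acc : Int × PySem.Dict String Int) (i : Nat) =>
            let pred := pvDel word (i : Int)
            if PySem.Set.contains S pred then
              let c := pvChain S fuel' pred acc.2
              (max acc.1 (1 + c.1), c.2)
            else acc) (1, memo)
        (r.1, r.2.insert word r.1)

def solution_726_5_alt (words : List String) : Int :=
  let S : PySem.Set String := PySem.Set.ofList (words.filter (fun w => w ≠ ""))
  let r := words.foldl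
    (fun (acc : List Int × PySem.Dict String Int) w =>
      if w ≠ "" then
        let c := pvChain S w.toList.length w acc.2
        (acc.1 ++ [c.1], c.2)
      else acc) ([], PySem.Dict.empty)
  match PySem.List.max? r.1 (fun x => x) with
  | some v => v
  | none => 0   -- ValueError in Python (no non-empty word); excluded by Pre_

-- ===== PRECONDITION & SPEC =====
-- Pre_ excludes exactly the inputs with no non-empty word, on which both Pythons raise ValueError.
def Pre_solution_726_5 (words : List String) : Prop := ∃ w ∈ words, w ≠ ""
instance (words : List String) : Decidable (Pre_solution_726_5 words) := by
  unfold Pre_solution_726_5; infer_instance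
def pvWitness_solution_726_5 : List String := ["a", "ab"]

def Spec_solution_726_5 (words : List String) (out : Int) : Prop := out = solution_726_5_alt words
instance (words : List String) (out : Int) : Decidable (Spec_solution_726_5 words out) := by
  unfold Spec_solution_726_5; infer_instance

-- ===== CLAIM (what is proved, stated in full; the proofs are below) =====
def Claim_equal_solution_726_5 : Prop := ∀ (words : List String), Dom_solution_726_5 words → Pre_solution_726_5 words → Spec_solution_726_5 words (solution_726_5 words)

-- ===== LEMMAS AND PROOFS =====

-- the set of non-empty words (B's S; also characterises which keys A's dp ever holds)
def pvS (words : List String) : PySem.Set String :=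
  PySem.Set.ofList (words.filter (fun w => w ≠ ""))

-- specification value: length of the longest deletion chain ending at w (fuel = |w|)
def cval (S : PySem.Set String) : Nat → String → Int
  | 0, _ => 1
  | fuel + 1, w =>
    (List.range w.toList.length).foldl
      (fun (b : Int) (i : Nat) => if PySem.Set.contains S (pvDel w (i : Int)) then
          max b (1 + cval S fuel (pvDel w (i : Int))) else b) 1

def cspec (S : PySem.Set String) (w : String) : Int := cval S w.toList.length w

def pvG (S : PySem.Set String) (w : String) (i : Nat) : Int :=
  if PySem.Set.contains S (pvDel w (i : Int)) then 1 + cspec S (pvDel w (i : Int)) else 1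

-- A's inner-loop body and outer-loop body, named (definitionally equal to the port's lambdas)
def stepA (word : String) (dp : PySem.Dict String Int) (i : Nat) : PySem.Dict String Int :=
  let pred := pvDel word (i : Int)
  if dp.contains word = false then
    dp.insert word (dp.getD pred 0 + 1)
  else
    dp.insert word (max (dp.getD pred 0 + 1) (dp.getD word 0))

def outerA (dp : PySem.Dict String Int) (word : String) : PySem.Dict String Int :=
  (List.range word.toList.length).foldl (stepA word) dp

theorem pvDel_toList (w : String) (i : Nat) :
    (pvDel w (i : Int)).toList = w.toList.take i ++ w.toList.drop (i + 1) := by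
  have h1 : ((i : Int) + 1) = ((i + 1 : Nat) : Int) := by push_cast; ring
  simp only [pvDel, String.toList_ofList, h1, PySem.List.slice_to_natCast,
    PySem.List.slice_from_natCast]

theorem pvDel_length {w : String} {i : Nat} (h : i < w.toList.length) :
    (pvDel w (i : Int)).toList.length = w.toList.length - 1 := by
  rw [pvDel_toList, List.length_append, List.length_take, List.length_drop]
  omega

theorem pvDel_ne {w : String} {i : Nat} (h : i < w.toList.length) :
    pvDel w (i : Int) ≠ w := by
  intro he
  have h2 := pvDel_length h
  rw [he] at h2
  omega

theorem foldl_step_le (f : Int → Nat → Int) (hf : ∀ b i, b ≤ f b i) :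
    ∀ (L : List Nat) (b : Int), b ≤ L.foldl f b := by
  intro L
  induction L with
  | nil => intro b; simp
  | cons i L ih => intro b; exact le_trans (hf b i) (ih (f b i))

theorem one_le_cval (S : PySem.Set String) : ∀ (fuel : Nat) (w : String), 1 ≤ cval S fuel w := by
  intro fuel w
  cases fuel with
  | zero => simp [cval]
  | succ n =>
    rw [cval]
    apply foldl_step_le
    intro b i
    dsimp only
    split
    · exact le_max_left _ _
    · exact le_refl _

theorem one_le_cspec (S : PySem.Set String) (w : String) : 1 ≤ cspec S w := one_le_cval S _ w

theorem one_le_pvG (S : PySem.Set String) (w : String) (i : Nat) : 1 ≤ pvG S w i := by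
  unfold pvG; split
  · have := one_le_cspec S (pvDel w (i : Int)); omega
  · exact le_refl _

theorem foldl_if_eq_max (p : Nat → Prop) [DecidablePred p] (x : Nat → Int) :
    ∀ (L : List Nat) (b : Int), 1 ≤ b →
      L.foldl (fun (b : Int) (i : Nat) => if p i then max b (x i) else b) b
        = L.foldl (fun (b : Int) (i : Nat) => max b (if p i then x i else 1)) b := by
  intro L
  induction L with
  | nil => intro b _; rfl
  | cons i L ih =>
    intro b hb
    by_cases hp : p i
    · simp only [List.foldl_cons, if_pos hp]
      exact ih _ (le_trans hb (le_max_left _ _))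
    · simp only [List.foldl_cons, if_neg hp, max_eq_left hb]
      exact ih _ hb

theorem cspec_unfold (S : PySem.Set String) (w : String) :
    cspec S w = (List.range w.toList.length).foldl
      (fun (b : Int) (i : Nat) => if PySem.Set.contains S (pvDel w (i : Int)) then
          max b (1 + cspec S (pvDel w (i : Int))) else b) 1 := by
  rw [show cspec S w = cval S w.toList.length w from rfl]
  cases h : w.toList.length with
  | zero => simp [cval]
  | succ n =>
    rw [cval, h]
    apply PySem.List.foldl_congr_mem
    intro b i hi
    have hiw : i < w.toList.length := by rw [h]; exact List.mem_range.mp hi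
    have hlen : (pvDel w (i : Int)).toList.length = n := by
      rw [pvDel_length hiw, h]
      omega
    rw [show cspec S (pvDel w (i : Int))
        = cval S (pvDel w (i : Int)).toList.length (pvDel w (i : Int)) from rfl, hlen]

theorem cspec_maxg (S : PySem.Set String) (w : String) :
    cspec S w = (List.range w.toList.length).foldl (fun (b : Int) (i : Nat) => max b (pvG S w i)) 1 := by
  rw [cspec_unfold]
  exact foldl_if_eq_max (fun i => PySem.Set.contains S (pvDel w (i : Int)) = true) _ _ 1 (le_refl 1)

theorem pvG_le_cspec {S : PySem.Set String} {w : String} {i : Nat}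
    (h : i < w.toList.length) : pvG S w i ≤ cspec S w := by
  have hle := (PySem.List.le_foldl_max ((List.range w.toList.length).map (pvG S w)) 1).2
    (pvG S w i) (List.mem_map_of_mem (List.mem_range.mpr h))
  rw [List.foldl_map] at hle
  rw [cspec_maxg]
  exact hle

theorem foldl_max_absorb (g : Nat → Int) :
    ∀ (L : List Nat) (b : Int), (∀ i ∈ L, g i ≤ b) →
      L.foldl (fun (b : Int) (i : Nat) => max b (g i)) b = b := by
  intro L
  induction L with
  | nil => intro b _; rfl
  | cons i L ih =>
    intro b h
    have h1 : max b (g i) = b := max_eq_left (h i (by simp))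
    simp only [List.foldl_cons, h1]
    exact ih b (fun j hj => h j (by simp [hj]))

-- ----- A side -----

theorem stepA_fold (S : PySem.Set String) (w : String) :
    ∀ (L : List Nat) (dp : PySem.Dict String Int) (v : Int),
      (∀ i ∈ L, i < w.toList.length) →
      (∀ i ∈ L, dp.get? (pvDel w (i : Int)) =
        if PySem.Set.contains S (pvDel w (i : Int)) then some (cspec S (pvDel w (i : Int))) else none) →
      dp.get? w = some v →
      (L.foldl (stepA w) dp).get? w = some (L.foldl (fun (b : Int) (i : Nat) => max b (pvG S w i)) v) ∧
      ∀ x, x ≠ w → (L.foldl (stepA w) dp).get? x = dp.get? x := by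
  intro L
  induction L with
  | nil => intro dp v _ _ hv; exact ⟨hv, fun x _ => rfl⟩
  | cons i L ih =>
    intro dp v hlt hup hv
    have hi : i < w.toList.length := hlt i (by simp)
    have hcont : dp.contains w = true := by
      rw [PySem.Dict.contains_eq_isSome_get?, hv]; rfl
    have hgv : dp.getD w 0 = v := by rw [PySem.Dict.getD_eq_get?_getD, hv]; rfl
    have hpred : dp.getD (pvDel w (i : Int)) 0 + 1 = pvG S w i := by
      rw [PySem.Dict.getD_eq_get?_getD, hup i (by simp)]
      unfold pvG
      split
      · simp only [Option.getD_some]; ring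
      · rfl
    have hstep : stepA w dp i = dp.insert w (max v (pvG S w i)) := by
      unfold stepA
      rw [hcont]
      simp only [Bool.true_eq_false, if_false, hpred, hgv, max_comm]
    rw [List.foldl_cons, hstep]
    have hne : ∀ j, j ∈ L → (dp.insert w (max v (pvG S w i))).get? (pvDel w (j : Int)) = dp.get? (pvDel w (j : Int)) := by
      intro j hj
      rw [PySem.Dict.get?_insert, if_neg (pvDel_ne (hlt j (by simp [hj])))]
    have hres := ih (dp.insert w (max v (pvG S w i))) (max v (pvG S w i))
      (fun j hj => hlt j (by simp [hj]))
      (fun j hj => by rw [hne j hj]; exact hup j (by simp [hj]))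
      (by rw [PySem.Dict.get?_insert, if_pos rfl])
    refine ⟨hres.1, fun x hx => ?_⟩
    rw [hres.2 x hx, PySem.Dict.get?_insert, if_neg hx]

theorem innerA (S : PySem.Set String) (w : String) (dp : PySem.Dict String Int)
    (hw : w.toList.length ≠ 0)
    (hup : ∀ i, i < w.toList.length → dp.get? (pvDel w (i : Int)) =
      if PySem.Set.contains S (pvDel w (i : Int)) then some (cspec S (pvDel w (i : Int))) else none)
    (hw0 : dp.get? w = none ∨ dp.get? w = some (cspec S w)) :
    ((List.range w.toList.length).foldl (stepA w) dp).get? w = some (cspec S w) ∧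
    ∀ x, x ≠ w → ((List.range w.toList.length).foldl (stepA w) dp).get? x = dp.get? x := by
  obtain ⟨n, hn⟩ : ∃ n, w.toList.length = n + 1 := ⟨w.toList.length - 1, by omega⟩
  rcases hw0 with h0 | h0
  · -- w not yet in dp: the first index inserts it, the rest update it
    rw [hn, List.range_succ_eq_map, List.foldl_cons]
    have h00 : (0 : Nat) < w.toList.length := by omega
    have hcont : dp.contains w = false := by
      rw [PySem.Dict.contains_eq_isSome_get?, h0]; rfl
    have hpred : dp.getD (pvDel w ((0 : Nat) : Int)) 0 + 1 = pvG S w 0 := by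
      rw [PySem.Dict.getD_eq_get?_getD, hup 0 h00]
      unfold pvG
      split
      · simp only [Option.getD_some]; ring
      · rfl
    have hstep : stepA w dp 0 = dp.insert w (pvG S w 0) := by
      unfold stepA
      rw [hcont, if_pos rfl, hpred]
    rw [hstep]
    have hmemL : ∀ j ∈ (List.range n).map Nat.succ, j < w.toList.length := by
      intro j hj
      obtain ⟨k, hk, rfl⟩ := List.mem_map.mp hj
      have := List.mem_range.mp hk
      omega
    have hres := stepA_fold S w ((List.range n).map Nat.succ) (dp.insert w (pvG S w 0)) (pvG S w 0)
      hmemL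
      (fun j hj => by
        rw [PySem.Dict.get?_insert, if_neg (pvDel_ne (hmemL j hj))]
        exact hup j (hmemL j hj))
      (by rw [PySem.Dict.get?_insert, if_pos rfl])
    refine ⟨?_, fun x hx => by rw [hres.2 x hx, PySem.Dict.get?_insert, if_neg hx]⟩
    rw [hres.1]
    congr 1
    have hmax := cspec_maxg S w
    rw [hn, List.range_succ_eq_map, List.foldl_cons] at hmax
    rw [hmax]
    congr 1
    exact (max_eq_right (one_le_pvG S w 0)).symm
  · -- w already in dp with its final value: everything is absorbed
    have hres := stepA_fold S w (List.range w.toList.length) dp (cspec S w)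
      (fun i hi => List.mem_range.mp hi)
      (fun i hi => hup i (List.mem_range.mp hi))
      h0
    refine ⟨?_, hres.2⟩
    rw [hres.1]
    congr 1
    exact foldl_max_absorb _ _ _ (fun i hi => pvG_le_cspec (List.mem_range.mp hi))

def InvA (S : PySem.Set String) (words : List String)
    (dp : PySem.Dict String Int) (suffix : List String) : Prop :=
  (∀ x v, dp.get? x = some v → x ∈ words ∧ x ≠ "" ∧ v = cspec S x) ∧
  (∀ x, x ∈ words → x ≠ "" → x ∉ suffix → (dp.get? x).isSome = true)

theorem nonempty_of_len_ne_zero {w : String} (h : w.toList.length ≠ 0) : w ≠ "" := by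
  intro he; subst he; simp at h

theorem outerA_fold (S : PySem.Set String) (words : List String)
    (hS : ∀ x, PySem.Set.contains S x = true ↔ (x ∈ words ∧ x ≠ "")) :
    ∀ (suffix : List String) (dp : PySem.Dict String Int),
      (∀ x ∈ suffix, x ∈ words) →
      suffix.Pairwise (fun a b => a.toList.length ≤ b.toList.length) →
      InvA S words dp suffix →
      InvA S words (suffix.foldl outerA dp) [] := by
  intro suffix
  induction suffix with
  | nil => intro dp _ _ hInv; exact hInv
  | cons w rest ih =>
    intro dp hsub hsort hInv
    rw [List.foldl_cons]
    rcases List.pairwise_cons.mp hsort with ⟨hw_rest, hsort'⟩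
    by_cases hw : w.toList.length = 0
    · -- w = "": empty range, dp unchanged
      have hdp : outerA dp w = dp := by unfold outerA; rw [hw]; rfl
      rw [hdp]
      apply ih dp (fun x hx => hsub x (by simp [hx])) hsort'
      refine ⟨hInv.1, fun x hx hne hnr => ?_⟩
      have hwe : w = "" := by
        cases hww : w.toList with
        | cons c l => rw [hww] at hw; simp at hw
        | nil => cases w with | _ l => simp_all
      have hxw : x ≠ w := by rw [hwe]; exact hne
      exact hInv.2 x hx hne (by simp [hxw, hnr])
    · -- w non-empty: the inner loop sets dp[w] = cspec S w
      have hup : ∀ i, i < w.toList.length → dp.get? (pvDel w (i : Int)) =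
          if PySem.Set.contains S (pvDel w (i : Int)) then some (cspec S (pvDel w (i : Int))) else none := by
        intro i hi
        by_cases hc : PySem.Set.contains S (pvDel w (i : Int)) = true
        · rw [if_pos hc]
          rcases (hS _).mp hc with ⟨hmem, hne⟩
          have hlenp : (pvDel w (i : Int)).toList.length = w.toList.length - 1 := pvDel_length hi
          have hnot_suffix : pvDel w (i : Int) ∉ w :: rest := by
            intro hin
            rcases List.mem_cons.mp hin with he | hin
            · rw [he] at hlenp; omega
            · have := hw_rest _ hin; omega
          have hsome := hInv.2 _ hmem hne hnot_suffix
          obtain ⟨v, hv⟩ := Option.isSome_iff_exists.mp hsome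
          rw [hv]
          rcases hInv.1 _ _ hv with ⟨_, _, rfl⟩
          rfl
        · rw [if_neg hc]
          cases hg : dp.get? (pvDel w (i : Int)) with
          | none => rfl
          | some v =>
            rcases hInv.1 _ _ hg with ⟨hmem, hne, _⟩
            exact absurd ((hS _).mpr ⟨hmem, hne⟩) hc
      have hw0 : dp.get? w = none ∨ dp.get? w = some (cspec S w) := by
        cases hg : dp.get? w with
        | none => exact Or.inl rfl
        | some v =>
          rcases hInv.1 _ _ hg with ⟨_, _, rfl⟩
          exact Or.inr rfl
      have hres := innerA S w dp hw hup hw0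
      apply ih (outerA dp w) (fun x hx => hsub x (by simp [hx])) hsort'
      constructor
      · intro x v hv
        by_cases hx : x = w
        · subst hx
          rw [show (outerA dp x) = (List.range x.toList.length).foldl (stepA x) dp from rfl, hres.1] at hv
          cases hv
          exact ⟨hsub x (by simp), nonempty_of_len_ne_zero hw, rfl⟩
        · rw [show (outerA dp w) = (List.range w.toList.length).foldl (stepA w) dp from rfl,
            hres.2 x hx] at hv
          exact hInv.1 x v hv
      · intro x hx hne hnr
        by_cases hxw : x = w
        · subst hxw
          rw [show (outerA dp x) = (List.range x.toList.length).foldl (stepA x) dp from rfl, hres.1]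
          rfl
        · rw [show (outerA dp w) = (List.range w.toList.length).foldl (stepA w) dp from rfl,
            hres.2 x hxw]
          exact hInv.2 x hx hne (by simp [hxw, hnr])

theorem foldl_preserve {α β : Type} (P : β → Prop) (step : β → α → β)
    (hstep : ∀ d x, P d → P (step d x)) :
    ∀ (L : List α) (d : β), P d → P (L.foldl step d) := by
  intro L
  induction L with
  | nil => intro d h; exact h
  | cons x L ih => intro d h; exact ih _ (hstep d x h)

theorem nodup_keys_outerA :
    ∀ (L : List String) (dp : PySem.Dict String Int),
      dp.keys.Nodup → (L.foldl outerA dp).keys.Nodup := by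
  refine foldl_preserve (fun d => d.keys.Nodup) outerA ?_
  intro dp w h
  unfold outerA
  refine foldl_preserve (fun d => d.keys.Nodup) (stepA w) ?_ _ dp h
  intro d i hd
  unfold stepA
  dsimp only
  split
  · exact PySem.Dict.nodup_keys_insert _ _ _ hd
  · exact PySem.Dict.nodup_keys_insert _ _ _ hd

-- ----- B side -----

def MInv (S : PySem.Set String) (memo : PySem.Dict String Int) : Prop :=
  ∀ x v, memo.get? x = some v → v = cspec S x

theorem chain_correct (S : PySem.Set String) :
    ∀ (fuel : Nat) (w : String) (memo : PySem.Dict String Int),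
      w.toList.length ≤ fuel → MInv S memo →
      (pvChain S fuel w memo).1 = cspec S w ∧ MInv S (pvChain S fuel w memo).2 := by
  intro fuel
  induction fuel with
  | zero =>
    intro w memo hlen hM
    have hw0 : w.toList.length = 0 := by omega
    rw [pvChain]
    cases hg : memo.get? w with
    | some v => exact ⟨hM w v hg, hM⟩
    | none =>
      dsimp only
      have hcs : cspec S w = 1 := by
        rw [show cspec S w = cval S w.toList.length w from rfl, hw0]
        simp [cval]
      refine ⟨hcs.symm, fun x v hv => ?_⟩
      rw [PySem.Dict.get?_insert] at hv
      split at hv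
      · next h => cases hv; subst h; exact hcs.symm
      · exact hM x v hv
  | succ n ih =>
    intro w memo hlen hM
    rw [pvChain]
    cases hg : memo.get? w with
    | some v => exact ⟨hM w v hg, hM⟩
    | none =>
      dsimp only
      have hfold : ∀ (L : List Nat), (∀ i ∈ L, i < w.toList.length) →
          ∀ (b : Int) (m : PySem.Dict String Int), MInv S m →
          ((L.foldl (fun (acc : Int × PySem.Dict String Int) (i : Nat) =>
              if PySem.Set.contains S (pvDel w (i : Int)) then
                (max acc.1 (1 + (pvChain S n (pvDel w (i : Int)) acc.2).1),
                 (pvChain S n (pvDel w (i : Int)) acc.2).2)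
              else acc) (b, m)).1
            = L.foldl (fun (b : Int) (i : Nat) => if PySem.Set.contains S (pvDel w (i : Int)) then
                max b (1 + cspec S (pvDel w (i : Int))) else b) b) ∧
          MInv S ((L.foldl (fun (acc : Int × PySem.Dict String Int) (i : Nat) =>
              if PySem.Set.contains S (pvDel w (i : Int)) then
                (max acc.1 (1 + (pvChain S n (pvDel w (i : Int)) acc.2).1),
                 (pvChain S n (pvDel w (i : Int)) acc.2).2)
              else acc) (b, m)).2) := by
        intro L
        induction L with
        | nil => intro _ b m hm; exact ⟨rfl, hm⟩
        | cons i L ihL =>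
          intro hlt b m hm
          have hi : i < w.toList.length := hlt i (by simp)
          have hplen : (pvDel w (i : Int)).toList.length ≤ n := by
            have := pvDel_length hi; omega
          by_cases hc : PySem.Set.contains S (pvDel w (i : Int)) = true
          · have hrec := ih (pvDel w (i : Int)) m hplen hm
            simp only [List.foldl_cons, if_pos hc]
            rcases ihL (fun j hj => hlt j (by simp [hj]))
              (max b (1 + (pvChain S n (pvDel w (i : Int)) m).1))
              ((pvChain S n (pvDel w (i : Int)) m).2) hrec.2 with ⟨e1, e2⟩
            refine ⟨?_, e2⟩
            rw [e1, hrec.1]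
          · simp only [List.foldl_cons, if_neg hc]
            exact ihL (fun j hj => hlt j (by simp [hj])) b m hm
      have hfold' := hfold (List.range w.toList.length)
        (fun i hi => List.mem_range.mp hi) 1 memo hM
      constructor
      · rw [hfold'.1]
        exact (cspec_unfold S w).symm
      · intro x v hv
        rw [PySem.Dict.get?_insert] at hv
        split at hv
        · next hxw =>
          cases hv
          subst hxw
          rw [hfold'.1]
          exact (cspec_unfold S x).symm
        · exact hfold'.2 x v hv

theorem B_vals (S : PySem.Set String) :
    ∀ (ws : List String) (acc : List Int) (memo : PySem.Dict String Int), MInv S memo →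
      ((ws.foldl (fun (acc : List Int × PySem.Dict String Int) (w : String) =>
          if w ≠ "" then
            (acc.1 ++ [(pvChain S w.toList.length w acc.2).1], (pvChain S w.toList.length w acc.2).2)
          else acc) (acc, memo)).1
        = acc ++ (ws.filter (fun w => w ≠ "")).map (cspec S)) ∧
      MInv S ((ws.foldl (fun (acc : List Int × PySem.Dict String Int) (w : String) =>
          if w ≠ "" then
            (acc.1 ++ [(pvChain S w.toList.length w acc.2).1], (pvChain S w.toList.length w acc.2).2)
          else acc) (acc, memo)).2) := by
  intro ws
  induction ws with
  | nil => intro acc memo hM; exact ⟨by simp, hM⟩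
  | cons w ws ih =>
    intro acc memo hM
    by_cases hw : w = ""
    · subst hw
      simp only [List.foldl_cons, ne_eq, not_true_eq_false, if_false, List.filter_cons]
      rcases ih acc memo hM with ⟨h1, h2⟩
      exact ⟨by rw [h1]; rfl, h2⟩
    · have hc := chain_correct S w.toList.length w memo (le_refl _) hM
      simp only [List.foldl_cons, ne_eq, hw, not_false_eq_true, if_true, List.filter_cons]
      rcases ih (acc ++ [(pvChain S w.toList.length w memo).1]) _ hc.2 with ⟨h1, h2⟩
      refine ⟨?_, h2⟩
      rw [h1, hc.1]
      simp

-- ----- assembling both sides -----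

theorem max?_id_eq_of_mem_iff (l1 l2 : List Int)
    (h : ∀ v, v ∈ l1 ↔ v ∈ l2) (hne : l1 ≠ []) :
    PySem.List.max? l1 (fun x => x) = PySem.List.max? l2 (fun x => x) := by
  obtain ⟨a, ha⟩ := List.exists_mem_of_ne_nil l1 hne
  have hne2 : l2 ≠ [] := fun h2 => by subst h2; exact absurd ((h a).mp ha) (List.not_mem_nil)
  cases h1 : PySem.List.max? l1 (fun x => x) with
  | none => exact absurd ((PySem.List.max?_eq_none_iff l1 _).mp h1) hne
  | some m1 =>
    cases h2 : PySem.List.max? l2 (fun x => x) with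
    | none => exact absurd ((PySem.List.max?_eq_none_iff l2 _).mp h2) hne2
    | some m2 =>
      have hm1 : m1 ∈ l2 := (h m1).mp (PySem.List.max?_mem h1)
      have hm2 : m2 ∈ l1 := (h m2).mpr (PySem.List.max?_mem h2)
      have h12 : m1 ≤ m2 := PySem.List.max?_isMax h2 m1 hm1
      have h21 : m2 ≤ m1 := PySem.List.max?_isMax h1 m2 hm2
      rw [le_antisymm h12 h21]

theorem contains_pvS (words : List String) (x : String) :
    PySem.Set.contains (pvS words) x = true ↔ (x ∈ words ∧ x ≠ "") := by
  rw [PySem.Set.contains_iff]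
  unfold pvS
  rw [PySem.Set.mem_ofList, List.mem_filter]
  simp

-- ===== VERDICT (by name: the statement is the Claim_ definition above) =====
theorem solution_726_5_spec : Claim_equal_solution_726_5 := by
  intro words _ hpre
  unfold Spec_solution_726_5
  have hA : solution_726_5 words =
      (match PySem.List.max? ((PySem.List.sorted words (fun w => PySem.Str.len w) false).foldl
          outerA PySem.Dict.empty).values (fun x => x) with
        | some v => v
        | none => 0) := by
    unfold solution_726_5 outerA stepA
    rfl
  have hB : solution_726_5_alt words =
      (match PySem.List.max? ((words.filter (fun w => w ≠ "")).map (cspec (pvS words))) (fun x => x) with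
        | some v => v
        | none => 0) := by
    have hv := (B_vals (pvS words) words [] PySem.Dict.empty
      (fun x v hv => by rw [PySem.Dict.get?_empty] at hv; cases hv)).1
    rw [show solution_726_5_alt words =
      (match PySem.List.max? ((words.foldl (fun (acc : List Int × PySem.Dict String Int) (w : String) =>
          if w ≠ "" then
            (acc.1 ++ [(pvChain (pvS words) w.toList.length w acc.2).1], (pvChain (pvS words) w.toList.length w acc.2).2)
          else acc) ([], PySem.Dict.empty)).1) (fun x => x) with
        | some v => v
        | none => 0) from rfl]
    rw [hv]
    rfl
  set S := pvS words with hSdef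
  set ws := PySem.List.sorted words (fun w => PySem.Str.len w) false with hws
  have hInv : InvA S words (ws.foldl outerA PySem.Dict.empty) [] := by
    apply outerA_fold S words (contains_pvS words)
    · intro x hx; exact (PySem.List.mem_sorted _ _ _ _).mp hx
    · have hp := PySem.List.sorted_pairwise words (fun w => PySem.Str.len w)
      apply hp.imp
      intro a b hab
      rw [PySem.Str.len_eq, PySem.Str.len_eq] at hab
      exact_mod_cast hab
    · refine ⟨fun x v hv => ?_, fun x hx hne hns => ?_⟩
      · rw [PySem.Dict.get?_empty] at hv; cases hv
      · exact absurd ((PySem.List.mem_sorted _ _ _ _).mpr hx) hns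
  have hnodup : (ws.foldl outerA PySem.Dict.empty).keys.Nodup :=
    nodup_keys_outerA ws PySem.Dict.empty PySem.Dict.nodup_keys_empty
  set dp := ws.foldl outerA PySem.Dict.empty with hdp
  have hmem : ∀ v, v ∈ dp.values ↔ v ∈ (words.filter (fun w => w ≠ "")).map (cspec S) := by
    intro v
    constructor
    · intro hv
      simp only [PySem.Dict.values] at hv
      obtain ⟨p, hp, hpv⟩ := List.mem_map.mp hv
      have hg := PySem.Dict.get?_of_mem_items dp (k := p.1) (v := p.2)
        (by rw [← Prod.mk.eta (p := p)] at hp; exact hp) hnodup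
      rcases hInv.1 _ _ hg with ⟨hmem', hne', hval⟩
      exact List.mem_map.mpr ⟨p.1, List.mem_filter.mpr ⟨hmem', by simp [hne']⟩, by rw [← hpv, hval]⟩
    · intro hv
      obtain ⟨x, hx, hxv⟩ := List.mem_map.mp hv
      rcases List.mem_filter.mp hx with ⟨hxw, hxne⟩
      have hxne' : x ≠ "" := by simpa using hxne
      have hs := hInv.2 x hxw hxne' (List.not_mem_nil)
      obtain ⟨v', hv'⟩ := Option.isSome_iff_exists.mp hs
      rcases hInv.1 _ _ hv' with ⟨_, _, rfl⟩
      simp only [PySem.Dict.values]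
      exact List.mem_map.mpr ⟨(x, cspec S x), PySem.Dict.mem_items_of_get?_eq_some dp hv', hxv⟩
  obtain ⟨w0, hw0, hw0ne⟩ := hpre
  have hBne : (words.filter (fun w => w ≠ "")).map (cspec S) ≠ [] := by
    simp only [ne_eq, List.map_eq_nil_iff, List.filter_eq_nil_iff]
    intro hall
    exact absurd (by simp [hw0ne]) (hall w0 hw0)
  have hAne : dp.values ≠ [] := by
    intro hnil
    have hx := (hmem (cspec S w0)).mpr
      (List.mem_map.mpr ⟨w0, List.mem_filter.mpr ⟨hw0, by simp [hw0ne]⟩, rfl⟩)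
    rw [hnil] at hx
    exact List.not_mem_nil hx
  rw [hA, hB, max?_id_eq_of_mem_iff _ _ hmem hAne]
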